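-- pv_equiv track=rewrite | github.com/norla111236/Advance-algorithm | premutation_BFS&DFS.py | cmax
-- ===== SOURCE A (Python) =====
-- def cmax(job):
--     Cmax = job[0][0] + job[0][1]
--     for i in range(1, len(job)):
--         if(job[i][0] <= Cmax):
--             Cmax += job[i][1]
--         else:
--             Cmax = job[i][0]
--             Cmax += job[i][1]
--     return Cmax
-- ===== SOURCE B (Python) =====
-- def cmax(job):
--     suffix = 0
--     candidates = []
--     for release, proc in reversed(job):
--         suffix += proc
--         candidates.append(release + suffix)
--     return max(candidates)
-- ===== Notes on version B (the rewrite author's own statement) =====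
-- stated objective: alternative
-- what changed: Replaces A's forward running-completion-time loop (conditional reset when a release time exceeds the running Cmax) by a reverse pass that builds suffix sums of processing times and returns the maximum of release+suffix over all jobs.
-- outside the precondition, e.g. on cmax([]): A raises IndexError, B raises ValueError
import Mathlib
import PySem

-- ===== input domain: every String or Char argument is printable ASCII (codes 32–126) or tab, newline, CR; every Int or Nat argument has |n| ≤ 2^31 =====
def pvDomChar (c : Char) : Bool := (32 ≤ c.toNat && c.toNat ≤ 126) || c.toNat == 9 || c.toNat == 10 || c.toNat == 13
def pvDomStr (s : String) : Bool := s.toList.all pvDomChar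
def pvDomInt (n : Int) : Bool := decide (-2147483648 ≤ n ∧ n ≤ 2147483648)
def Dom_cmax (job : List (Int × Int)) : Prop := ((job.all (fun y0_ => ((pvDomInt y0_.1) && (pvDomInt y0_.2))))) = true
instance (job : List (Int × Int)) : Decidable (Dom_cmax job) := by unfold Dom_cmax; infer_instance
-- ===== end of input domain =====

-- B replaces A's forward conditional running-completion loop by a reverse suffix-sum pass
-- taking the maximum of release + suffix over all jobs (alternative decomposition, same cost).

-- ===== PORT A =====
def cmax (job : List (Int × Int)) : Int :=
  let Cmax0 := (PySem.List.pyGetD job 0 ((0 : Int), (0 : Int))).1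
             + (PySem.List.pyGetD job 0 ((0 : Int), (0 : Int))).2
  (PySem.List.pyRange 1 (job.length : Int) 1).foldl
    (fun Cmax i =>
      let ji := PySem.List.pyGetD job i ((0 : Int), (0 : Int))
      if ji.1 ≤ Cmax then Cmax + ji.2 else ji.1 + ji.2) Cmax0

-- ===== PORT B =====
def cmax_alt (job : List (Int × Int)) : Int :=
  let st := job.reverse.foldl
    (fun (st : Int × List Int) rp =>
      let suffix := st.1 + rp.2
      (suffix, st.2 ++ [rp.1 + suffix])) ((0 : Int), ([] : List Int))
  (PySem.List.max? st.2 (fun x => x)).getD 0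

-- ===== PRECONDITION & SPEC =====
-- A raises IndexError on the empty list (job[0]); B raises ValueError (max of empty sequence).
def Pre_cmax (job : List (Int × Int)) : Prop := job ≠ []
instance (job : List (Int × Int)) : Decidable (Pre_cmax job) := by unfold Pre_cmax; infer_instance
def pvWitness_cmax : (List (Int × Int)) := [(3, 2), (1, 4)]
def Spec_cmax (job : List (Int × Int)) (out : Int) : Prop := out = cmax_alt job
instance (job : List (Int × Int)) (out : Int) : Decidable (Spec_cmax job out) := by unfold Spec_cmax; infer_instance

-- ===== CLAIM (what is proved, stated in full; the proofs are below) =====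
def Claim_equal_cmax : Prop := ∀ (job : List (Int × Int)), Dom_cmax job → Pre_cmax job → Spec_cmax job (cmax job)

-- ===== LEMMAS AND PROOFS =====

-- sum of processing times
def sumP (l : List (Int × Int)) : Int := (l.map (·.2)).sum

-- candidate list front-to-back: release j + suffix sum of processing times from j on
def cands : List (Int × Int) → List Int
  | [] => []
  | (r, p) :: t => (r + p + sumP t) :: cands t

-- maximum candidate, recursively (spec both ports are reduced to)
def mcands : List (Int × Int) → Int
  | [] => 0
  | (r, p) :: t => if t = [] then r + p else max (r + p + sumP t) (mcands t)

def listMax : List Int → Int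
  | [] => 0
  | x :: t => t.foldl max x

theorem sumP_cons (r p : Int) (t : List (Int × Int)) : sumP ((r, p) :: t) = p + sumP t := by
  simp [sumP]

theorem cands_ne_nil {l : List (Int × Int)} (h : l ≠ []) : cands l ≠ [] := by
  cases l with
  | nil => exact absurd rfl h
  | cons x t => cases x; simp [cands]

-- A's fold over the tail equals the candidate-maximum characterisation
theorem foldA_char (t : List (Int × Int)) : ∀ c : Int,
    t.foldl (fun C rp => if rp.1 ≤ C then C + rp.2 else rp.1 + rp.2) c
      = (if t = [] then c else max (c + sumP t) (mcands t)) := by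
  induction t with
  | nil => intro c; simp
  | cons x u ih =>
    intro c
    obtain ⟨r, p⟩ := x
    have step : (List.foldl (fun C rp => if rp.1 ≤ C then C + rp.2 else rp.1 + rp.2) c ((r, p) :: u))
        = List.foldl (fun C rp => if rp.1 ≤ C then C + rp.2 else rp.1 + rp.2) (max c r + p) u := by
      simp only [List.foldl_cons]
      congr 1
      split_ifs <;> omega
    rw [step, ih]
    by_cases hu : u = []
    · subst hu; simp [mcands, sumP]
    · simp only [if_neg hu, if_neg (by simp : (r, p) :: u ≠ [])]
      rw [show mcands ((r, p) :: u) = max (r + p + sumP u) (mcands u) from by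
        simp [mcands, hu], sumP_cons]
      omega

-- appending one element to a max scan
theorem listMax_append_singleton (l : List Int) (y : Int) :
    listMax (l ++ [y]) = if l = [] then y else max (listMax l) y := by
  cases l with
  | nil => simp [listMax]
  | cons a u => simp [listMax, List.foldl_append]

-- the maximum of the reversed candidate list is mcands
theorem listMax_cands_rev (l : List (Int × Int)) (h : l ≠ []) :
    listMax ((cands l).reverse) = mcands l := by
  induction l with
  | nil => exact absurd rfl h
  | cons x t ih =>
    obtain ⟨r, p⟩ := x
    simp only [cands, List.reverse_cons, listMax_append_singleton]
    by_cases ht : t = []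
    · subst ht; simp [cands, mcands, sumP]
    · rw [if_neg (by simpa using cands_ne_nil ht), ih ht]
      simp [mcands, ht, max_comm]

-- B's reverse fold builds the reversed candidate list (shifted by the initial suffix)
-- together with the total processing sum
theorem foldB_char (l : List (Int × Int)) : ∀ (s : Int) (cs : List Int),
    l.reverse.foldl
      (fun (st : Int × List Int) rp =>
        let suffix := st.1 + rp.2
        (suffix, st.2 ++ [rp.1 + suffix])) (s, cs)
      = (s + sumP l, cs ++ (cands l).reverse.map (fun x => x + s)) := by
  induction l with
  | nil => intro s cs; simp [sumP, cands]
  | cons x t ih =>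
    intro s cs
    obtain ⟨r, p⟩ := x
    simp only [List.reverse_cons, List.foldl_append, List.foldl_cons, List.foldl_nil, ih]
    simp only [cands, sumP_cons, List.reverse_cons, List.map_append, List.map_cons, List.map_nil,
      List.append_assoc, Prod.mk.injEq]
    refine ⟨by omega, ?_⟩
    congr 3
    omega

theorem max?_getD_listMax (l : List Int) :
    (PySem.List.max? l (fun y => y)).getD 0 = listMax l := by
  cases l with
  | nil => rfl
  | cons x t => rw [PySem.List.max?_id_cons]; rfl

theorem cmax_eq (job : List (Int × Int)) (h : job ≠ []) : cmax job = mcands job := by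
  obtain ⟨⟨r, p⟩, t, rfl⟩ : ∃ x t, job = x :: t := by
    cases job with
    | nil => exact absurd rfl h
    | cons a b => exact ⟨a, b, rfl⟩
  show List.foldl
      (fun C i =>
        if (PySem.List.pyGetD ((r, p) :: t) i ((0 : Int), (0 : Int))).1 ≤ C then
          C + (PySem.List.pyGetD ((r, p) :: t) i ((0 : Int), (0 : Int))).2
        else (PySem.List.pyGetD ((r, p) :: t) i ((0 : Int), (0 : Int))).1
          + (PySem.List.pyGetD ((r, p) :: t) i ((0 : Int), (0 : Int))).2)
      ((PySem.List.pyGetD ((r, p) :: t) 0 ((0 : Int), (0 : Int))).1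
        + (PySem.List.pyGetD ((r, p) :: t) 0 ((0 : Int), (0 : Int))).2)
      (PySem.List.pyRange 1 (((r, p) :: t).length : Int) 1) = _
  rw [PySem.List.foldl_pyRange_pyGetD' ((r, p) :: t) ((0 : Int), (0 : Int))
        (fun C rp => if rp.1 ≤ C then C + rp.2 else rp.1 + rp.2) _ (by omega : (0:Int) ≤ 1)]
  simp only [Int.toNat_one, List.drop_one, List.tail_cons, PySem.List.pyGetD_zero_cons]
  rw [foldA_char]
  by_cases ht : t = []
  · subst ht; simp [mcands]
  · simp [mcands, ht]

theorem cmax_alt_eq (job : List (Int × Int)) (h : job ≠ []) : cmax_alt job = mcands job := by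
  unfold cmax_alt
  rw [foldB_char job 0 []]
  simp only [List.nil_append]
  have hmap : (cands job).reverse.map (fun x => x + 0) = (cands job).reverse := by simp
  rw [hmap, max?_getD_listMax, listMax_cands_rev job h]

-- ===== VERDICT (by name: the statement is the Claim_ definition above) =====
theorem cmax_spec : Claim_equal_cmax := by
  intro job _ hpre
  unfold Spec_cmax
  rw [cmax_eq job hpre, cmax_alt_eq job hpre]
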